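-- pv_equiv track=rewrite | github.com/AlexanderBedrosyan/Programming-Fundamentals-with-Python | Lists Advanced - More Exercises/take_skip_rope_2.py | fill_the_lists
-- ===== SOURCE A (Python) =====
-- def fill_the_lists(message, starting_list, even_list, odd_list):
--     counter = 0
--     for ch in message:
--         if not ch.isdigit():
--             starting_list.append(ch)
--         else:
--             if counter % 2 == 0:
--                 even_list.append(int(ch))
--             else:
--                 odd_list.append(int(ch))
--             counter += 1
--     return starting_list, even_list, odd_list
-- ===== SOURCE B (Python) =====
-- def fill_the_lists(message, starting_list, even_list, odd_list):
--     starting_list.extend(ch for ch in message if not ch.isdigit())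
--     digits = [int(ch) for ch in message if ch.isdigit()]
--     even_list.extend(digits[0::2])
--     odd_list.extend(digits[1::2])
--     return starting_list, even_list, odd_list
-- ===== Notes on version B (the rewrite author's own statement) =====
-- stated objective: simpler
-- what changed: Replaces the single interleaved loop with a modulo counter by a collect-then-split decomposition: filter out the non-digits, build the digit list once, then stride-slice it ([0::2]/[1::2]) into the even and odd lists.
import Mathlib
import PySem

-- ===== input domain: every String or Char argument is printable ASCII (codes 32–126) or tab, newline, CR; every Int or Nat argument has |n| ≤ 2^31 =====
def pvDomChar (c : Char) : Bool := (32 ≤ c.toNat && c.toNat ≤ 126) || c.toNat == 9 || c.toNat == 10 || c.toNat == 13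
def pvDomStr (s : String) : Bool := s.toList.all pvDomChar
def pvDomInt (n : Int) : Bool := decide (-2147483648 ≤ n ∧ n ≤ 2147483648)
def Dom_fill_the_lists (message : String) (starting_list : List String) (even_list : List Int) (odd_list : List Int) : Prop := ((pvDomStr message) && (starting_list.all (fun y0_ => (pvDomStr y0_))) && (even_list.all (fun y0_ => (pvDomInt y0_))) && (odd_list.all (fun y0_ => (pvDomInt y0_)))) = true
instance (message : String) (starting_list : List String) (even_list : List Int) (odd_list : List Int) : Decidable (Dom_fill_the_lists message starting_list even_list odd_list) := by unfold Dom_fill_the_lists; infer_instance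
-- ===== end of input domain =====

-- B replaces A's interleaved loop with a modulo counter by a collect-then-split
-- decomposition (filter non-digits, build the digit list, stride-slice it): simpler.
-- In Python both mutate the three list arguments; the equivalence proved here is about the return value.


-- ===== PORT A =====
-- the loop body of A; ch.isdigit() on one printable-ASCII char is Char.isDigit, int(ch) on a digit char is code-48
def pvStepA (acc : List String × List Int × List Int × Int) (ch : Char) : List String × List Int × List Int × Int :=
  if !ch.isDigit then (acc.1 ++ [ch.toString], acc.2.1, acc.2.2.1, acc.2.2.2)
  else if acc.2.2.2 % 2 = 0 then (acc.1, acc.2.1 ++ [((ch.toNat : Int) - 48)], acc.2.2.1, acc.2.2.2 + 1)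
  else (acc.1, acc.2.1, acc.2.2.1 ++ [((ch.toNat : Int) - 48)], acc.2.2.2 + 1)

def fill_the_lists (message : String) (starting_list : List String) (even_list : List Int) (odd_list : List Int) : List String × List Int × List Int :=
  let r := message.toList.foldl pvStepA (starting_list, even_list, odd_list, (0 : Int))
  (r.1, r.2.1, r.2.2.1)

-- ===== PORT B =====
-- hand port of the step-2 slice xs[0::2] for a nonnegative start (exact there: indices 0,2,4,…)
def stride2 : List Int → List Int
  | [] => []
  | [x] => [x]
  | x :: _ :: xs => x :: stride2 xs

def fill_the_lists_alt (message : String) (starting_list : List String) (even_list : List Int) (odd_list : List Int) : List String × List Int × List Int :=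
  let digits := (message.toList.filter (fun ch => ch.isDigit)).map (fun ch => ((ch.toNat : Int) - 48))
  (starting_list ++ (message.toList.filter (fun ch => !ch.isDigit)).map (fun ch => ch.toString),
   even_list ++ stride2 digits,
   odd_list ++ stride2 digits.tail)

-- ===== PRECONDITION & SPEC =====
def Spec_fill_the_lists (message : String) (starting_list : List String) (even_list : List Int) (odd_list : List Int) (out : List String × List Int × List Int) : Prop := out = fill_the_lists_alt message starting_list even_list odd_list
instance (message : String) (starting_list : List String) (even_list : List Int) (odd_list : List Int) (out : List String × List Int × List Int) : Decidable (Spec_fill_the_lists message starting_list even_list odd_list out) := by unfold Spec_fill_the_lists; infer_instance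

-- ===== CLAIM (what is proved, stated in full; the proofs are below) =====
def Claim_equal_fill_the_lists : Prop := ∀ (message : String) (starting_list : List String) (even_list : List Int) (odd_list : List Int), Dom_fill_the_lists message starting_list even_list odd_list → Spec_fill_the_lists message starting_list even_list odd_list (fill_the_lists message starting_list even_list odd_list)

-- ===== LEMMAS AND PROOFS =====
def pvDigs (chars : List Char) : List Int :=
  (chars.filter (fun ch => ch.isDigit)).map (fun ch => ((ch.toNat : Int) - 48))

lemma stride2_cons (x : Int) (xs : List Int) : stride2 (x :: xs) = x :: stride2 xs.tail := by
  cases xs <;> simp [stride2]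

lemma pv_loop_eq (chars : List Char) : ∀ (s : List String) (e o : List Int) (c : Int),
    chars.foldl pvStepA (s, e, o, c)
    = (s ++ (chars.filter (fun ch => !ch.isDigit)).map (fun ch => ch.toString),
       (if c % 2 = 0 then e ++ stride2 (pvDigs chars) else e ++ stride2 (pvDigs chars).tail),
       (if c % 2 = 0 then o ++ stride2 (pvDigs chars).tail else o ++ stride2 (pvDigs chars)),
       c + ((chars.filter (fun ch => ch.isDigit)).length : Int)) := by
  induction chars with
  | nil => intro s e o c; simp [pvDigs, stride2]
  | cons ch rest ih =>
    intro s e o c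
    rw [List.foldl_cons]
    by_cases hd : ch.isDigit
    · have hds : pvDigs (ch :: rest) = ((ch.toNat : Int) - 48) :: pvDigs rest := by
        simp [pvDigs, List.filter_cons, hd]
      by_cases hc : c % 2 = 0
      · have hstep : pvStepA (s, e, o, c) ch
            = (s, e ++ [((ch.toNat : Int) - 48)], o, c + 1) := by
          simp [pvStepA, hd, hc]
        have hc1 : ¬ (c + 1) % 2 = 0 := by omega
        rw [hstep, ih, hds, stride2_cons]
        simp [hc, hc1, List.filter_cons, hd]
        omega
      · have hstep : pvStepA (s, e, o, c) ch
            = (s, e, o ++ [((ch.toNat : Int) - 48)], c + 1) := by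
          simp [pvStepA, hd, hc]
        have hc1 : (c + 1) % 2 = 0 := by omega
        rw [hstep, ih, hds, stride2_cons]
        simp [hc, hc1, List.filter_cons, hd]
        omega
    · have hstep : pvStepA (s, e, o, c) ch
          = (s ++ [ch.toString], e, o, c) := by
        simp [pvStepA, hd]
      rw [hstep, ih]
      simp [List.filter_cons, hd, pvDigs]

-- ===== VERDICT (by name: the statement is the Claim_ definition above) =====
theorem fill_the_lists_spec : Claim_equal_fill_the_lists := by
  intro message starting_list even_list odd_list _
  unfold Spec_fill_the_lists fill_the_lists fill_the_lists_alt
  rw [pv_loop_eq]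
  simp [pvDigs]
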